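-- pv_equiv track=rewrite | github.com/mananbhatia/requirements-elicitation-agent | scenario_generator/phase6_assemble.py | _build_topic_taxonomy
-- ===== SOURCE A (Python) =====
-- def _build_topic_taxonomy(discoveries: list, char_knowledge: list) -> str:
--     """Build topic taxonomy from all tagged items."""
--     topics = {}
--     for item in discoveries + char_knowledge:
--         topic = item.get("topic", "")
--         if topic and topic not in topics:
--             # Generate display name from topic code
--             display = topic.replace("/", " — ").replace("_", " ").title()
--             topics[topic] = display
--
--     lines = []
--     # Sort by topic code for consistency
--     for code in sorted(topics.keys()):
--         lines.append(f"{code}: {topics[code]}")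
--     return "\n".join(lines)
-- ===== SOURCE B (Python) =====
-- def _build_topic_taxonomy(discoveries: list, char_knowledge: list) -> str:
--     """Build topic taxonomy from all tagged items."""
--     codes = []
--     for item in discoveries + char_knowledge:
--         topic = item.get("topic", "")
--         if topic:
--             codes.append(topic)
--     codes.sort()
--     lines = []
--     prev = None
--     for code in codes:
--         if code != prev:
--             lines.append(f"{code}: " + code.replace("/", " — ").replace("_", " ").title())
--         prev = code
--     return "\n".join(lines)
-- ===== Notes on version B (the rewrite author's own statement) =====
-- stated objective: alternative
-- what changed: Replaces the dict-based dedup (hash map of code->display, then sort the keys and look each one up) with sort-then-adjacent-dedup: collect all truthy codes into a plain list, sort it, and emit a formatted line only when the code differs from the previous one, computing the display name inline.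
import Mathlib
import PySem

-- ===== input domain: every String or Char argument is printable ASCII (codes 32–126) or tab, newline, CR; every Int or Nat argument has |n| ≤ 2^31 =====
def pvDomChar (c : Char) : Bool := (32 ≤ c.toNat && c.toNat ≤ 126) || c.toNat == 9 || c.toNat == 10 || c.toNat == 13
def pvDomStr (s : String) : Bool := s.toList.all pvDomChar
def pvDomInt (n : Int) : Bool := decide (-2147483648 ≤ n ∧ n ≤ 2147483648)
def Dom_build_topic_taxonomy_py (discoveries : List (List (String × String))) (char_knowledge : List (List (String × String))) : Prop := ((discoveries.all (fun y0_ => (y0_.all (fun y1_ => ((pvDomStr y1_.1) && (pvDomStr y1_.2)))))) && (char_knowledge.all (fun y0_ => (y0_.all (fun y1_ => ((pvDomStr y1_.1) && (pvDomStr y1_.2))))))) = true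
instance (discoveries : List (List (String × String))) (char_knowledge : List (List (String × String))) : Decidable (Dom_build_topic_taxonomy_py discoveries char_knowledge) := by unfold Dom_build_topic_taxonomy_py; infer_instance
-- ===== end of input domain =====

-- B replaces A's dict-based dedup (code -> display map, sort the keys, look each up) with
-- sort-then-adjacent-dedup over a plain list of codes; return values are proved equal.

-- shared helpers: both Pythons contain exactly these expressions
-- item.get("topic", "")
def pvGetTopic (item : List (String × String)) : String :=
  PySem.Dict.getD (PySem.Dict.mk item) "topic" ""

-- Python str.title(), hand-ported (no PySem primitive): a letter following a cased character
-- (= an ASCII letter on the Dom_ domain) is lowercased, any other letter is uppercased;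
-- exact on the ASCII domain.
def pvTitleGo (prevCased : Bool) : List Char → List Char
  | [] => []
  | c :: cs =>
    let isA := PySem.Chars.isalpha c
    (if isA then (if prevCased then PySem.Chars.lowerChar c else PySem.Chars.upperChar c) else c)
      :: pvTitleGo isA cs

-- topic.replace("/", " — ").replace("_", " ").title()
def pvDisplay (topic : String) : String :=
  String.ofList (pvTitleGo false (PySem.Str.replace (PySem.Str.replace topic "/" " — ") "_" " ").toList)

-- ===== PORT A =====
def build_topic_taxonomy_py (discoveries : List (List (String × String))) (char_knowledge : List (List (String × String))) : String :=
  let topics := (discoveries ++ char_knowledge).foldl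
    (fun t item =>
      let topic := pvGetTopic item
      if topic ≠ "" ∧ PySem.Dict.contains t topic = false then
        PySem.Dict.insert t topic (pvDisplay topic)
      else t)
    PySem.Dict.empty
  let lines := (PySem.List.sorted (PySem.Dict.keys topics) (fun x => x) false).foldl
    (fun ls code => ls ++ [code ++ ": " ++ PySem.Dict.getD topics code ""]) []
  PySem.Str.join "\n" lines

-- ===== PORT B =====
def build_topic_taxonomy_py_alt (discoveries : List (List (String × String))) (char_knowledge : List (List (String × String))) : String :=
  let codes := (discoveries ++ char_knowledge).foldl
    (fun acc item =>
      let topic := pvGetTopic item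
      if topic ≠ "" then acc ++ [topic] else acc)
    []
  let sortedCodes := PySem.List.sorted codes (fun x => x) false
  let res := sortedCodes.foldl
    (fun (st : Option String × List String) code =>
      (some code,
        if some code ≠ st.1 then st.2 ++ [code ++ ": " ++ pvDisplay code] else st.2))
    (none, [])
  PySem.Str.join "\n" res.2

-- ===== PRECONDITION & SPEC =====
def Spec_build_topic_taxonomy_py (discoveries : List (List (String × String))) (char_knowledge : List (List (String × String))) (out : String) : Prop := out = build_topic_taxonomy_py_alt discoveries char_knowledge
instance (discoveries : List (List (String × String))) (char_knowledge : List (List (String × String))) (out : String) : Decidable (Spec_build_topic_taxonomy_py discoveries char_knowledge out) := by unfold Spec_build_topic_taxonomy_py; infer_instance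

-- ===== CLAIM (what is proved, stated in full; the proofs are below) =====
def Claim_equal_build_topic_taxonomy_py : Prop := ∀ (discoveries : List (List (String × String))) (char_knowledge : List (List (String × String))), Dom_build_topic_taxonomy_py discoveries char_knowledge → Spec_build_topic_taxonomy_py discoveries char_knowledge (build_topic_taxonomy_py discoveries char_knowledge)

-- ===== LEMMAS AND PROOFS =====

def pvDAdj : Option String → List String → List String
  | _, [] => []
  | prev, c :: rest => if some c ≠ prev then c :: pvDAdj (some c) rest else pvDAdj (some c) rest

theorem pv_foldB_snd (fmt : String → String) (l : List String) :
    ∀ (prev : Option String) (acc : List String),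
      (l.foldl (fun (st : Option String × List String) code =>
          (some code, if some code ≠ st.1 then st.2 ++ [fmt code] else st.2)) (prev, acc)).2
        = acc ++ (pvDAdj prev l).map fmt := by
  induction l with
  | nil => intro prev acc; simp [pvDAdj]
  | cons c rest ih =>
    intro prev acc
    simp only [List.foldl_cons]
    rw [ih]
    by_cases h : some c ≠ prev
    · simp [pvDAdj, h]
    · simp [pvDAdj, h]

theorem pv_dAdj_mem (l : List String) :
    ∀ (prev : Option String), l.Pairwise (· ≤ ·) →
      (∀ p, prev = some p → ∀ x ∈ l, p ≤ x) →
      ∀ x, x ∈ pvDAdj prev l ↔ x ∈ l ∧ some x ≠ prev := by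
  induction l with
  | nil => intro prev _ _ x; simp [pvDAdj]
  | cons c rest ih =>
    intro prev hp hlow x
    rw [List.pairwise_cons] at hp
    have ihx := ih (some c) hp.2 (fun p hep y hy => by cases hep; exact hp.1 y hy) x
    by_cases h : some c ≠ prev
    · simp only [pvDAdj, if_pos h, List.mem_cons]
      constructor
      · rintro (rfl | hx)
        · exact ⟨Or.inl rfl, h⟩
        · rcases (ihx.mp hx) with ⟨hxr, hxc⟩
          refine ⟨Or.inr hxr, ?_⟩
          rcases prev with _ | p
          · simp
          · have hpc : p ≤ c := hlow p rfl c (List.mem_cons_self ..)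
            have hne : c ≠ p := fun e => h (by rw [e])
            have : p < c := lt_of_le_of_ne hpc (Ne.symm hne)
            have hcx : c ≤ x := hp.1 x hxr
            simp only [ne_eq, Option.some.injEq]
            intro e
            subst e
            exact absurd (lt_of_lt_of_le this hcx) (lt_irrefl x)
      · rintro ⟨(rfl | hxr), hxp⟩
        · exact Or.inl rfl
        · by_cases hxc : x = c
          · exact Or.inl hxc
          · exact Or.inr (ihx.mpr ⟨hxr, by simpa using hxc⟩)
    · rw [not_ne_iff] at h
      subst h
      simp only [pvDAdj]
      rw [if_neg (by simp : ¬ ((some c : Option String) ≠ some c)), ihx]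
      simp only [List.mem_cons, ne_eq, Option.some.injEq]
      constructor
      · rintro ⟨hxr, hxc⟩; exact ⟨Or.inr hxr, hxc⟩
      · rintro ⟨(rfl | hxr), hxc⟩
        · exact absurd rfl hxc
        · exact ⟨hxr, hxc⟩

theorem pv_dAdj_pairwise_lt (l : List String) :
    ∀ (prev : Option String), l.Pairwise (· ≤ ·) →
      (∀ p, prev = some p → ∀ x ∈ l, p ≤ x) →
      (pvDAdj prev l).Pairwise (· < ·) := by
  induction l with
  | nil => intro prev _ _; simp [pvDAdj]
  | cons c rest ih =>
    intro prev hp hlow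
    rw [List.pairwise_cons] at hp
    have hlow' : ∀ p, (some c : Option String) = some p → ∀ x ∈ rest, p ≤ x :=
      fun p hep y hy => by cases hep; exact hp.1 y hy
    have ihc := ih (some c) hp.2 hlow'
    by_cases h : some c ≠ prev
    · simp only [pvDAdj, if_pos h]
      refine List.pairwise_cons.mpr ⟨?_, ihc⟩
      intro y hy
      rcases (pv_dAdj_mem rest (some c) hp.2 hlow' y).mp hy with ⟨hyr, hyc⟩
      exact lt_of_le_of_ne (hp.1 y hyr) (fun e => hyc (by rw [e]))
    · simp only [pvDAdj, if_neg h]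
      exact ihc

theorem pv_dedup_sorted (codes : List String) :
    pvDAdj none (PySem.List.sorted codes (fun x => x) false)
      = PySem.List.sorted (PySem.Set.ofList codes) (fun x => x) false := by
  have hp : (PySem.List.sorted codes (fun x => x) false).Pairwise (· ≤ ·) :=
    PySem.List.sorted_pairwise codes (fun x => x)
  have hlow : ∀ p, (none : Option String) = some p →
      ∀ x ∈ PySem.List.sorted codes (fun x => x) false, p ≤ x := by
    intro p h; cases h
  have hlt := pv_dAdj_pairwise_lt _ none hp hlow
  have hnd : (pvDAdj none (PySem.List.sorted codes (fun x => x) false)).Nodup :=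
    hlt.imp (fun h => ne_of_lt h)
  have hperm : (pvDAdj none (PySem.List.sorted codes (fun x => x) false)).Perm
      (PySem.Set.ofList codes) := by
    rw [List.perm_ext_iff_of_nodup hnd (PySem.Set.nodup_ofList codes)]
    intro x
    rw [pv_dAdj_mem _ none hp hlow x, PySem.Set.mem_ofList, PySem.List.mem_sorted]
    simp
  exact (PySem.List.sorted_eq_of_perm_of_pairwise_lt _ _ (fun x => x) hperm hlt).symm

theorem pv_foldA_keys (xs : List (List (String × String))) :
    ∀ (t : PySem.Dict String String),
      (xs.foldl (fun t item =>
          if pvGetTopic item ≠ "" ∧ PySem.Dict.contains t (pvGetTopic item) = false then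
            PySem.Dict.insert t (pvGetTopic item) (pvDisplay (pvGetTopic item))
          else t) t).keys
      = PySem.Set.update t.keys
          ((xs.filter (fun i => decide (pvGetTopic i ≠ ""))).map pvGetTopic) := by
  induction xs with
  | nil => intro t; simp [PySem.Set.update]
  | cons i rest ih =>
    intro t
    simp only [List.foldl_cons, List.filter_cons]
    by_cases ht : pvGetTopic i ≠ ""
    · have hdt : decide (pvGetTopic i ≠ "") = true := by simpa using ht
      simp only [hdt, if_true, List.map_cons]
      by_cases hc : PySem.Dict.contains t (pvGetTopic i) = false
      · rw [if_pos ⟨ht, hc⟩, ih, PySem.Set.update_cons]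
        congr 1
        rw [PySem.Dict.keys_insert_of_not_contains _ _ hc, PySem.Set.add_of_not_mem]
        intro hmem
        rw [(PySem.Dict.contains_iff_mem_keys _ _).mpr hmem] at hc
        exact Bool.true_eq_false.mp hc
      · rw [if_neg (fun h => hc h.2), ih, PySem.Set.update_cons, PySem.Set.add_of_mem]
        exact (PySem.Dict.contains_iff_mem_keys _ _).mp (Bool.not_eq_false _ |>.mp hc)
    · rw [if_neg (fun h => ht h.1)]
      have hdf : decide (pvGetTopic i ≠ "") = false := by simpa using ht
      simp only [hdf, Bool.false_eq_true, if_false]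
      exact ih t

theorem pv_foldA_get (xs : List (List (String × String))) :
    ∀ (t : PySem.Dict String String) (c : String),
      (xs.foldl (fun t item =>
          if pvGetTopic item ≠ "" ∧ PySem.Dict.contains t (pvGetTopic item) = false then
            PySem.Dict.insert t (pvGetTopic item) (pvDisplay (pvGetTopic item))
          else t) t).get? c
      = (t.get? c).or
          (if c ∈ (xs.filter (fun i => decide (pvGetTopic i ≠ ""))).map pvGetTopic
           then some (pvDisplay c) else none) := by
  induction xs with
  | nil => intro t c; cases h : t.get? c <;> simp [h]
  | cons i rest ih =>
    intro t c
    simp only [List.foldl_cons, List.filter_cons]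
    by_cases ht : pvGetTopic i ≠ ""
    · have hdt : decide (pvGetTopic i ≠ "") = true := by simpa using ht
      simp only [hdt, if_true, List.map_cons]
      by_cases hc : PySem.Dict.contains t (pvGetTopic i) = false
      · rw [if_pos ⟨ht, hc⟩, ih]
        by_cases hct : c = pvGetTopic i
        · subst hct
          rw [PySem.Dict.get?_insert_self]
          have hnone : t.get? (pvGetTopic i) = none := by
            rw [PySem.Dict.get?_eq_none_iff_contains]; exact hc
          rw [hnone]
          simp
        · rw [PySem.Dict.get?_insert_of_ne _ _ hct]
          have hmm : (c ∈ pvGetTopic i :: (rest.filter (fun i => decide (pvGetTopic i ≠ ""))).map pvGetTopic)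
              ↔ (c ∈ (rest.filter (fun i => decide (pvGetTopic i ≠ ""))).map pvGetTopic) := by
            simp [List.mem_cons, hct]
          rw [if_congr hmm rfl rfl]
      · rw [if_neg (fun h => hc h.2), ih]
        by_cases hct : c = pvGetTopic i
        · subst hct
          cases h : t.get? (pvGetTopic i) with
          | none => rw [PySem.Dict.get?_eq_none_iff_contains] at h; exact absurd h hc
          | some v => simp
        · have hmm : (c ∈ pvGetTopic i :: (rest.filter (fun i => decide (pvGetTopic i ≠ ""))).map pvGetTopic)
              ↔ (c ∈ (rest.filter (fun i => decide (pvGetTopic i ≠ ""))).map pvGetTopic) := by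
            simp [List.mem_cons, hct]
          rw [if_congr hmm rfl rfl]
    · rw [if_neg (fun h => ht h.1)]
      have hdf : decide (pvGetTopic i ≠ "") = false := by simpa using ht
      simp only [hdf, Bool.false_eq_true, if_false]
      exact ih t c

theorem pv_codes_fold (l : List (List (String × String))) :
    ∀ (acc : List String),
      l.foldl (fun acc item => if pvGetTopic item ≠ "" then acc ++ [pvGetTopic item] else acc) acc
        = acc ++ (l.filter (fun i => decide (pvGetTopic i ≠ ""))).map pvGetTopic := by
  induction l with
  | nil => intro acc; simp
  | cons i r ih =>
    intro acc
    simp only [List.foldl_cons, List.filter_cons]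
    by_cases h : pvGetTopic i ≠ ""
    · have hdt : decide (pvGetTopic i ≠ "") = true := by simpa using h
      rw [if_pos h, ih]
      simp [hdt]
    · have hdf : decide (pvGetTopic i ≠ "") = false := by simpa using h
      rw [if_neg h, ih]
      simp [hdf]

-- ===== VERDICT (by name: the statement is the Claim_ definition above) =====
theorem build_topic_taxonomy_py_spec : Claim_equal_build_topic_taxonomy_py := by
  intro d ck _
  unfold Spec_build_topic_taxonomy_py
  simp only [build_topic_taxonomy_py, build_topic_taxonomy_py_alt]
  rw [pv_codes_fold, List.nil_append]
  rw [pv_foldB_snd (fun code => code ++ ": " ++ pvDisplay code), List.nil_append]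
  rw [pv_dedup_sorted]
  rw [pv_foldA_keys]
  rw [PySem.Dict.keys_empty, PySem.Set.update_nil_left]
  rw [PySem.List.foldl_append_singleton_eq_map, List.nil_append]
  refine congrArg (PySem.Str.join "\n") ?_
  apply List.map_congr_left
  intro c hcmem
  have hcc : c ∈ (((d ++ ck).filter (fun i => decide (pvGetTopic i ≠ ""))).map pvGetTopic) := by
    have h1 := (PySem.List.mem_sorted _ _ _ _).mp hcmem
    exact (PySem.Set.mem_ofList (xs := ((d ++ ck).filter (fun i => decide (pvGetTopic i ≠ ""))).map pvGetTopic) (y := c)).mp h1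
  have hg := pv_foldA_get (d ++ ck) PySem.Dict.empty c
  rw [PySem.Dict.get?_empty, if_pos hcc, Option.none_or] at hg
  rw [PySem.Dict.getD_eq_get?_getD, hg]
  rfl
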